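-- pv_equiv track=rewrite | github.com/AEO3/sbom-compile-orderer | sbom_compile_order/parser.py | _extract_source_url
-- ===== SOURCE A (Python) =====
-- from typing import Dict, List, Optional, Set, Tuple
--
-- def _extract_source_url(component_data: Dict) -> str:
--     """
--     Extract source URL from component external references.
--
--     Looks for VCS (version control system) URLs first, then other types.
--
--     Args:
--         component_data: Dictionary containing component information
--
--     Returns:
--         Source URL string, or empty string if not found
--     """
--     external_refs = component_data.get("externalReferences", [])
--     if not external_refs:
--         return ""
--
--     # Prefer VCS URLs (version control system)
--     for ref in external_refs:
--         ref_type = ref.get("type", "").lower()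
--         ref_url = ref.get("url", "")
--         if ref_type == "vcs" and ref_url:
--             return ref_url
--
--     # Fall back to other URL types (website, distribution, etc.)
--     for ref in external_refs:
--         ref_url = ref.get("url", "")
--         if ref_url:
--             return ref_url
--
--     return ""
-- ===== SOURCE B (Python) =====
-- def _extract_source_url(component_data) -> str:
--     # Single pass: return the first truthy VCS url immediately; remember the
--     # first truthy url of any type as a fallback, returned after the loop.
--     fallback = None
--     for ref in component_data.get("externalReferences", []):
--         url = ref.get("url", "")
--         if ref.get("type", "").lower() == "vcs" and url:
--             return url
--         if fallback is None and url:
--             fallback = url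
--     return fallback if fallback is not None else ""
-- ===== Notes on version B (the rewrite author's own statement) =====
-- stated objective: simpler
-- what changed: Replaces A's two sequential scans (one for VCS urls, one for any url) by a single pass that returns a truthy VCS url immediately and carries the first truthy url as a fallback returned after the loop; the redundant empty-list early return disappears.
import Mathlib
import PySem

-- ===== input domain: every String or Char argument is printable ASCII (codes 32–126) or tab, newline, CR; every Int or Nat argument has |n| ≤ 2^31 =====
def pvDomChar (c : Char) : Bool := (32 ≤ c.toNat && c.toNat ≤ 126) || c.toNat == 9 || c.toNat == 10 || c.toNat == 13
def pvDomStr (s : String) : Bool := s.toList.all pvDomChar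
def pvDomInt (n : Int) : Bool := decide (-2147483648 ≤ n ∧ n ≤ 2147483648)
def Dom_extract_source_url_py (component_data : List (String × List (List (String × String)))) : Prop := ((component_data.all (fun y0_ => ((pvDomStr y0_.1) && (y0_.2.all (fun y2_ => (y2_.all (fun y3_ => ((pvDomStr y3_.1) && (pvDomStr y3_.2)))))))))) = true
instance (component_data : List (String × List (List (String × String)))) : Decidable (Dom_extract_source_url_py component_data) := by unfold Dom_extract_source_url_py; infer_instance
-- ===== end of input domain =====

-- B replaces A's two sequential scans by a single pass carrying a fallback; simpler, same cost.

-- ===== PORT A =====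
-- dict.get(k, dflt) on an association list: first match, else default (shared by both ports)
def pvGetD {α : Type} (d : List (String × α)) (k : String) (dflt : α) : α :=
  match d.find? (fun p => p.1 == k) with
  | some p => p.2
  | none => dflt

-- first loop of A: return the first ref with type.lower()=="vcs" and a truthy url
def pvFindVcs : List (List (String × String)) → Option String
  | [] => none
  | ref :: rest =>
    let ref_type := PySem.Str.lower (pvGetD ref "type" "")
    let ref_url := pvGetD ref "url" ""
    if ref_type == "vcs" && !(ref_url == "") then some ref_url else pvFindVcs rest

-- second loop of A: return the first truthy url
def pvFindAny : List (List (String × String)) → Option String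
  | [] => none
  | ref :: rest =>
    let ref_url := pvGetD ref "url" ""
    if !(ref_url == "") then some ref_url else pvFindAny rest

def extract_source_url_py (component_data : List (String × List (List (String × String)))) : String :=
  let external_refs := pvGetD component_data "externalReferences" []
  if external_refs.isEmpty then ""
  else
    match pvFindVcs external_refs with
    | some u => u
    | none =>
      match pvFindAny external_refs with
      | some u => u
      | none => ""

-- ===== PORT B =====
-- single pass with a fallback accumulator (Source B's loop)
def pvLoopB : List (List (String × String)) → Option String → String
  | [], fallback => fallback.getD ""
  | ref :: rest, fallback =>
    let url := pvGetD ref "url" ""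
    if PySem.Str.lower (pvGetD ref "type" "") == "vcs" && !(url == "") then url
    else pvLoopB rest (if fallback.isNone && !(url == "") then some url else fallback)

def extract_source_url_py_alt (component_data : List (String × List (List (String × String)))) : String :=
  pvLoopB (pvGetD component_data "externalReferences" []) none

-- ===== PRECONDITION & SPEC =====
def Spec_extract_source_url_py (component_data : List (String × List (List (String × String)))) (out : String) : Prop := out = extract_source_url_py_alt component_data
instance (component_data : List (String × List (List (String × String)))) (out : String) : Decidable (Spec_extract_source_url_py component_data out) := by unfold Spec_extract_source_url_py; infer_instance

-- ===== CLAIM (what is proved, stated in full; the proofs are below) =====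
def Claim_equal_extract_source_url_py : Prop := ∀ (component_data : List (String × List (List (String × String)))), Dom_extract_source_url_py component_data → Spec_extract_source_url_py component_data (extract_source_url_py component_data)

-- ===== LEMMAS AND PROOFS =====

-- the single pass equals: first VCS hit, else the seeded fallback, else the first truthy url
theorem pvLoopB_eq (refs : List (List (String × String))) (fb : Option String) :
    pvLoopB refs fb =
      match pvFindVcs refs with
      | some u => u
      | none =>
        match fb with
        | some f => f
        | none => (pvFindAny refs).getD "" := by
  induction refs generalizing fb with
  | nil => cases fb <;> simp [pvLoopB, pvFindVcs, pvFindAny]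
  | cons ref rest ih =>
    simp only [pvLoopB, pvFindVcs, pvFindAny]
    by_cases hv : (PySem.Str.lower (pvGetD ref "type" "") == "vcs" && !(pvGetD ref "url" "" == "")) = true
    · simp [hv]
    · simp only [Bool.not_eq_true] at hv
      rw [hv]
      simp only [Bool.false_eq_true, if_false, ih]
      cases fb with
      | some f => simp
      | none =>
        by_cases hu : (pvGetD ref "url" "" == "") = true
        · simp [hu]
        · simp only [Bool.not_eq_true] at hu
          simp [hu]

theorem extract_source_url_py_eq_alt (cd : List (String × List (List (String × String)))) :
    extract_source_url_py cd = extract_source_url_py_alt cd := by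
  unfold extract_source_url_py extract_source_url_py_alt
  rw [pvLoopB_eq]
  cases h : pvGetD cd "externalReferences" [] with
  | nil => simp [pvFindVcs, pvFindAny]
  | cons r rs =>
    simp only [List.isEmpty_cons, Bool.false_eq_true, if_false]
    cases pvFindVcs (r :: rs) with
    | some u => rfl
    | none => cases pvFindAny (r :: rs) <;> rfl

-- ===== VERDICT (by name: the statement is the Claim_ definition above) =====
theorem extract_source_url_py_spec : Claim_equal_extract_source_url_py := by
  intro cd _
  exact extract_source_url_py_eq_alt cd
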